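-- pv_equiv track=rewrite | github.com/DonggeonOh/algorithm-python | algorithm/problems/e_co_te_2021/parametric_search/make_tteokbokki_tteok.py | make_tteokbokki_tteok
-- ===== SOURCE A (Python) =====
-- def make_tteokbokki_tteok(tteoks, length):
--     """
--     파라메트릭 서치란 최적화 문제("예" 혹은 "아니요")로 바꾸어 해결하는 기법을 말한다
--     일반적으로 코딩 테스트에서 파라메트릭 서치 문제는 이진 탐색을 이용하여 문제 해결이 가능하다
--     ex) 특정한 조건을 만족하는 가장 알맞은 값을 빠르게 찾는 최적화 문제
--     :param tteoks: 떡의 길이가 담긴 리스트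
--     :param length: 손님이 가져갈 떡의 최소 길이
--     """
--     low_length = 0
--     high_length = max(tteoks)
--     max_length = high_length
--
--     while low_length <= high_length:
--         mid_length = int((low_length + high_length) / 2)
--         target_length = 0
--
--         for tteok in tteoks:
--             if tteok - mid_length > 0:
--                 target_length += tteok - mid_length
--
--         if target_length > length:
--             max_length = mid_length
--             low_length = mid_length + 1
--
--         elif target_length < length:
--             high_length = mid_length - 1
--
--         else:
--             return mid_length
--
--     return max_length
-- ===== SOURCE B (Python) =====
-- def make_tteokbokki_tteok(tteoks, length):
--     # Sort once, precompute suffix sums, then answer each cutter-height query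
--     # of the binary search with a hand-written bisect instead of a full scan.
--     xs = sorted(tteoks)
--     n = len(xs)
--     suf = [0] * (n + 1)
--     for i in range(n - 1, -1, -1):
--         suf[i] = suf[i + 1] + xs[i]
--
--     def cut_total(h):
--         # index of the first element > h (bisect_right)
--         lo, hi = 0, n
--         while lo < hi:
--             m = (lo + hi) // 2
--             if xs[m] <= h:
--                 lo = m + 1
--             else:
--                 hi = m
--         return suf[lo] - h * (n - lo)
--
--     low, high = 0, xs[-1]
--     best = high
--     while low <= high:
--         mid = (low + high) // 2
--         total = cut_total(mid)
--         if total > length: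
--             best = mid
--             low = mid + 1
--         elif total < length:
--             high = mid - 1
--         else:
--             return mid
--     return best
-- ===== Notes on version B (the rewrite author's own statement) =====
-- stated objective: faster
-- what changed: B sorts the tteok list once and precomputes suffix sums, answering each cutter-height query of the binary search with a bisect in O(log n) instead of A's full O(n) scan per query.
import Mathlib
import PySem

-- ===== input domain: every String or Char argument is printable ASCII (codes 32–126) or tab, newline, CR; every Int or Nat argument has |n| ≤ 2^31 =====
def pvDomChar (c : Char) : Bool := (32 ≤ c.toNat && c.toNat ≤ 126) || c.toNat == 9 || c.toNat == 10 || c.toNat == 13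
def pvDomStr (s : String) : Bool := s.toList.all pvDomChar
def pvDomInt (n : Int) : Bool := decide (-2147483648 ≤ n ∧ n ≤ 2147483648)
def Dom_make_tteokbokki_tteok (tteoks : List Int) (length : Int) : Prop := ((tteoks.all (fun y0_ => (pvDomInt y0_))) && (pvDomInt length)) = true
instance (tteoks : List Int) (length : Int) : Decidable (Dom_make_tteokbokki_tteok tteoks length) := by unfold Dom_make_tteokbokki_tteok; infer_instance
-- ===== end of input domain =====

-- B sorts the list once, precomputes suffix sums and answers each cutter-height query of
-- the outer binary search via a hand-written bisect instead of a full scan (objective: faster).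

-- ===== PORT A =====

-- the inner 'for tteok in tteoks' scan of A
def pvCutA (tteoks : List Int) (mid : Int) : Int :=
  tteoks.foldl (fun acc t => if t - mid > 0 then acc + (t - mid) else acc) 0

-- A's 'while low_length <= high_length' loop.
-- 'int((low+high)/2)' = floor division here: low+high is ≥ 0 at every call reached from
-- make_tteokbokki_tteok (low starts at 0 and never decreases below 0) and < 2^53, so the
-- float division is exact and int() truncation = floor.
def pvLoopA (tteoks : List Int) (length : Int) (low high maxL : Int) : Int :=
  if low ≤ high then
    let mid := PySem.Int.floordiv (low + high) 2
    let target := pvCutA tteoks mid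
    if target > length then pvLoopA tteoks length (mid + 1) high mid
    else if target < length then pvLoopA tteoks length low (mid - 1) maxL
    else mid
  else maxL
termination_by (high - low + 1).toNat
decreasing_by
  all_goals
    have h := PySem.Int.floordiv_two_mid_bounds (lo := low) (hi := high) (by omega)
    omega

-- max(tteoks) raises ValueError on []: Pre_ excludes the empty list, '.getD 0' is unreachable there
def make_tteokbokki_tteok (tteoks : List Int) (length : Int) : Int :=
  let high := (PySem.List.max? tteoks (fun y => y)).getD 0
  pvLoopA tteoks length 0 high high

-- ===== PORT B =====

-- the 'for i in range(n-1, -1, -1): suf[i] = suf[i+1] + xs[i]' backwards fill,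
-- as the structural recursion computing the same list suf (length n+1, suf[n] = 0)
def pvSuffix (xs : List Int) : List Int :=
  match xs with
  | [] => [0]
  | x :: t => (x + (pvSuffix t).headD 0) :: pvSuffix t

-- cut_total's 'while lo < hi' bisect; xs[m] never raises since 0 ≤ lo ≤ m < hi ≤ len xs,
-- so '.getD 0' below ('pyGetD') is exact
def pvBis (xs : List Int) (h : Int) (lo hi : Int) : Int :=
  if lo < hi then
    let m := PySem.Int.floordiv (lo + hi) 2
    if PySem.List.pyGetD xs m 0 ≤ h then pvBis xs h (m + 1) hi
    else pvBis xs h lo m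
  else lo
termination_by (hi - lo).toNat
decreasing_by
  all_goals
    have h1 := PySem.Int.floordiv_two_mid_bounds (lo := lo) (hi := hi) (by omega)
    have h2 : PySem.Int.floordiv (lo + hi) 2 < hi := by
      rw [PySem.Int.floordiv_lt_iff_lt_mul (by omega)]; omega
    omega

-- cut_total(h); suf[lo] never raises since 0 ≤ lo ≤ n = len suf - 1
def pvCutB (xs suf : List Int) (n h : Int) : Int :=
  let lo := pvBis xs h 0 n
  PySem.List.pyGetD suf lo 0 - h * (n - lo)

-- B's outer 'while low <= high' loop (identical skeleton to A's, different query)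
def pvLoopB (xs suf : List Int) (n length : Int) (low high best : Int) : Int :=
  if low ≤ high then
    let mid := PySem.Int.floordiv (low + high) 2
    let total := pvCutB xs suf n mid
    if total > length then pvLoopB xs suf n length (mid + 1) high mid
    else if total < length then pvLoopB xs suf n length low (mid - 1) best
    else mid
  else best
termination_by (high - low + 1).toNat
decreasing_by
  all_goals
    have h := PySem.Int.floordiv_two_mid_bounds (lo := low) (hi := high) (by omega)
    omega

-- xs[-1] raises IndexError on []: Pre_ excludes the empty list
def make_tteokbokki_tteok_alt (tteoks : List Int) (length : Int) : Int :=
  let xs := PySem.List.sorted tteoks (fun y => y) false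
  let n : Int := xs.length
  let suf := pvSuffix xs
  let high := PySem.List.pyGetD xs (-1) 0
  pvLoopB xs suf n length 0 high high

-- ===== PRECONDITION & SPEC =====
-- Pre_ excludes only the empty list, on which A raises ValueError (max of empty sequence)
def Pre_make_tteokbokki_tteok (tteoks : List Int) (length : Int) : Prop := tteoks ≠ []
instance (tteoks : List Int) (length : Int) : Decidable (Pre_make_tteokbokki_tteok tteoks length) := by unfold Pre_make_tteokbokki_tteok; infer_instance
def pvWitness_make_tteokbokki_tteok : List Int × Int := ([19, 14, 10, 17], 6)

def Spec_make_tteokbokki_tteok (tteoks : List Int) (length : Int) (out : Int) : Prop := out = make_tteokbokki_tteok_alt tteoks length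
instance (tteoks : List Int) (length : Int) (out : Int) : Decidable (Spec_make_tteokbokki_tteok tteoks length out) := by unfold Spec_make_tteokbokki_tteok; infer_instance

-- ===== CLAIM (what is proved, stated in full; the proofs are below) =====
def Claim_equal_make_tteokbokki_tteok : Prop := ∀ (tteoks : List Int) (length : Int), Dom_make_tteokbokki_tteok tteoks length → Pre_make_tteokbokki_tteok tteoks length → Spec_make_tteokbokki_tteok tteoks length (make_tteokbokki_tteok tteoks length)

-- ===== LEMMAS AND PROOFS =====

-- a conditional-accumulation loop is the sum of the per-element contributions
theorem pvFold_eq_sum (h : Int) (l : List Int) : ∀ a : Int,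
    l.foldl (fun acc t => if t - h > 0 then acc + (t - h) else acc) a
      = a + (l.map (fun t => if h < t then t - h else 0)).sum := by
  induction l with
  | nil => simp
  | cons x t ih =>
    intro a
    simp only [List.foldl_cons, List.map_cons, List.sum_cons, ih]
    split_ifs <;> omega

-- A's scan is the sum of the per-tteok contributions
theorem pvCutA_eq_sum (tteoks : List Int) (h : Int) :
    pvCutA tteoks h = (tteoks.map (fun t => if h < t then t - h else 0)).sum := by
  simpa [pvCutA] using pvFold_eq_sum h tteoks 0

-- index-vs-count characterisation of a sorted list
theorem sorted_getElem_le_iff (xs : List Int) (h : Int)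
    (hs : xs.Pairwise (· ≤ ·)) (i : Nat) (hi : i < xs.length) :
    xs[i] ≤ h ↔ i < xs.countP (fun x => decide (x ≤ h)) := by
  induction xs generalizing i with
  | nil => simp at hi
  | cons x t ih =>
    have hx := List.pairwise_cons.mp hs
    rw [List.countP_cons]
    by_cases hxh : x ≤ h
    · simp only [hxh, decide_true, if_true]
      cases i with
      | zero => simp [hxh]
      | succ i =>
        simp only [List.getElem_cons_succ]
        rw [ih hx.2 i (by simpa using hi)]
        omega
    · have ht0 : t.countP (fun x => decide (x ≤ h)) = 0 := by
        rw [List.countP_eq_zero]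
        intro y hy
        simp only [decide_eq_true_eq]
        intro hy'
        exact hxh (le_trans (hx.1 y hy) hy')
      simp only [hxh, decide_false, ht0]
      cases i with
      | zero => simp [hxh]
      | succ i =>
        simp only [List.getElem_cons_succ]
        rw [ih hx.2 i (by simpa using hi), ht0]
        simp

-- the bisect returns the number of elements ≤ h
theorem pvBis_eq_countP (xs : List Int) (h : Int) (hs : xs.Pairwise (· ≤ ·))
    (lo hi : Int) (hlo : 0 ≤ lo) (hlc : lo ≤ (xs.countP (fun x => decide (x ≤ h)) : Int))
    (hch : (xs.countP (fun x => decide (x ≤ h)) : Int) ≤ hi) (hhi : hi ≤ (xs.length : Int)) :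
    pvBis xs h lo hi = (xs.countP (fun x => decide (x ≤ h)) : Int) := by
  fun_induction pvBis xs h lo hi with
  | case1 lo hi hlt m hle ih =>
    have hmdef : m = PySem.Int.floordiv (lo + hi) 2 := rfl
    have hm := PySem.Int.floordiv_two_mid_bounds (lo := lo) (hi := hi) (by omega)
    have hm2 : PySem.Int.floordiv (lo + hi) 2 < hi := by
      rw [PySem.Int.floordiv_lt_iff_lt_mul (by omega)]; omega
    have hmn : m.toNat < xs.length := by omega
    rw [PySem.List.pyGetD_eq_getElem xs 0 (by omega) (by omega)] at hle
    have hcnt := (sorted_getElem_le_iff xs h hs m.toNat hmn).mp hle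
    exact ih (by omega) (by omega) hch hhi
  | case2 lo hi hlt m hgt ih =>
    have hmdef : m = PySem.Int.floordiv (lo + hi) 2 := rfl
    have hm := PySem.Int.floordiv_two_mid_bounds (lo := lo) (hi := hi) (by omega)
    have hm2 : PySem.Int.floordiv (lo + hi) 2 < hi := by
      rw [PySem.Int.floordiv_lt_iff_lt_mul (by omega)]; omega
    have hmn : m.toNat < xs.length := by omega
    rw [PySem.List.pyGetD_eq_getElem xs 0 (by omega) (by omega)] at hgt
    have hcnt : ¬ (m.toNat < xs.countP (fun x => decide (x ≤ h))) :=
      fun hc => hgt ((sorted_getElem_le_iff xs h hs m.toNat hmn).mpr hc)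
    exact ih hlo hlc (by omega) (by omega)
  | case3 lo hi hlt => omega

-- suf[k] is the sum of xs[k:]
theorem pvSuffix_getD (xs : List Int) (k : Nat) (hk : k ≤ xs.length) :
    (pvSuffix xs).getD k 0 = (xs.drop k).sum := by
  induction xs generalizing k with
  | nil =>
    have : k = 0 := by simpa using hk
    subst this; simp [pvSuffix]
  | cons x t ih =>
    cases k with
    | zero =>
      have h0 := ih 0 (by simp)
      simp only [pvSuffix, List.getD_cons_zero, List.drop_zero, List.sum_cons]
      have : (pvSuffix t).headD 0 = (pvSuffix t).getD 0 0 := by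
        cases pvSuffix t <;> simp
      rw [this, h0]; simp
    | succ k =>
      simp only [pvSuffix, List.getD_cons_succ, List.drop_succ_cons]
      exact ih k (by simpa using hk)

theorem map_sub_sum (h : Int) (l : List Int) :
    (l.map (fun x => x - h)).sum = l.sum - h * l.length := by
  induction l with
  | nil => simp
  | cons x t ih => simp [ih]; ring

-- split of the contribution sum over a sorted list at c = countP (≤ h)
theorem sorted_ite_sum (xs : List Int) (h : Int) (hs : xs.Pairwise (· ≤ ·)) :
    (xs.map (fun t => if h < t then t - h else 0)).sum
      = (xs.drop (xs.countP (fun x => decide (x ≤ h)))).sum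
        - h * ((xs.length : Int) - (xs.countP (fun x => decide (x ≤ h)) : Int)) := by
  have hiff := sorted_getElem_le_iff xs h hs
  set c := xs.countP (fun x => decide (x ≤ h)) with hc
  have hcle : c ≤ xs.length := List.countP_le_length
  have hsplit : xs = xs.take c ++ xs.drop c := (List.take_append_drop c xs).symm
  have htake : ∀ x ∈ xs.take c, x ≤ h := by
    intro x hx
    obtain ⟨j, hj, rfl⟩ := List.mem_take_iff_getElem.mp hx
    exact (hiff j (by omega)).mpr (by omega)
  have hdrop : ∀ x ∈ xs.drop c, h < x := by
    intro x hx
    obtain ⟨j, hj, rfl⟩ := List.mem_drop_iff_getElem.mp hx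
    by_contra hcon
    have := (hiff (c + j) (by omega)).mp (by omega)
    omega
  conv_lhs => rw [hsplit]
  rw [List.map_append, List.sum_append]
  have h1 : (List.map (fun t => if h < t then t - h else 0) (xs.take c)).sum = 0 := by
    apply List.sum_eq_zero
    intro y hy
    obtain ⟨x, hx, rfl⟩ := List.mem_map.mp hy
    simp [not_lt.mpr (htake x hx)]
  have h2 : List.map (fun t => if h < t then t - h else 0) (xs.drop c)
      = List.map (fun x => x - h) (xs.drop c) := by
    apply List.map_congr_left
    intro x hx
    simp [hdrop x hx]
  rw [h1, h2, map_sub_sum]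
  have hlen : (xs.drop c).length = xs.length - c := by simp
  rw [hlen]
  have : ((xs.length - c : Nat) : Int) = (xs.length : Int) - c := by omega
  rw [this]
  ring

-- both query functions agree for every height
theorem cut_eq (tteoks : List Int) (h : Int) :
    pvCutB (PySem.List.sorted tteoks (fun y => y) false)
           (pvSuffix (PySem.List.sorted tteoks (fun y => y) false))
           ((PySem.List.sorted tteoks (fun y => y) false).length : Int) h
      = pvCutA tteoks h := by
  have hs : (PySem.List.sorted tteoks (fun y => y) false).Pairwise (· ≤ ·) :=
    PySem.List.sorted_pairwise tteoks (fun y => y)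
  have hcle : (PySem.List.sorted tteoks (fun y => y) false).countP (fun x => decide (x ≤ h))
      ≤ (PySem.List.sorted tteoks (fun y => y) false).length := List.countP_le_length
  have hbis := pvBis_eq_countP _ h hs 0 ((PySem.List.sorted tteoks (fun y => y) false).length : Int)
    (by omega) (by omega) (by exact_mod_cast hcle) (le_refl _)
  show PySem.List.pyGetD (pvSuffix (PySem.List.sorted tteoks (fun y => y) false))
      (pvBis (PySem.List.sorted tteoks (fun y => y) false) h 0
        ((PySem.List.sorted tteoks (fun y => y) false).length : Int)) 0
    - h * (((PySem.List.sorted tteoks (fun y => y) false).length : Int)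
        - pvBis (PySem.List.sorted tteoks (fun y => y) false) h 0
            ((PySem.List.sorted tteoks (fun y => y) false).length : Int))
    = pvCutA tteoks h
  rw [hbis]
  rw [PySem.List.pyGetD_natCast]
  rw [pvSuffix_getD _ _ hcle]
  rw [pvCutA_eq_sum]
  have hperm := (PySem.List.sorted_perm tteoks (fun y => y) false).map
    (fun t => if h < t then t - h else 0)
  rw [← hperm.sum_eq]
  rw [sorted_ite_sum _ h hs]

-- with equal queries the two identical loop skeletons coincide
theorem loops_eq (tteoks xs suf : List Int) (n : Int)
    (hq : ∀ h, pvCutB xs suf n h = pvCutA tteoks h) (length : Int) :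
    ∀ low high best, pvLoopA tteoks length low high best = pvLoopB xs suf n length low high best := by
  intro low high best
  fun_induction pvLoopA tteoks length low high best with
  | case1 low high best hle mid target h1 ih =>
    rw [pvLoopB, if_pos hle]
    simp only [hq, ih]
    split_ifs with hA
    · rfl
    · exact absurd h1 hA
  | case2 low high best hle mid target h1 h2 ih =>
    rw [pvLoopB, if_pos hle]
    simp only [hq, ih]
    split_ifs with hA
    · exact absurd hA h1
    · rfl
  | case3 low high best hle mid target h1 h2 =>
    rw [pvLoopB, if_pos hle]
    simp only [hq]
    split_ifs with hA
    · exact absurd hA h1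
    · rfl
  | case4 low high best hle =>
    rw [pvLoopB, if_neg hle]

-- max(tteoks) is the last element of sorted(tteoks)
theorem max_eq_last (tteoks : List Int) (hne : tteoks ≠ []) :
    (PySem.List.max? tteoks (fun y => y)).getD 0
      = PySem.List.pyGetD (PySem.List.sorted tteoks (fun y => y) false) (-1) 0 := by
  have hxs : PySem.List.sorted tteoks (fun y => y) false ≠ [] := by
    simpa [PySem.List.sorted_eq_nil_iff] using hne
  rw [PySem.List.pyGetD_neg_one _ 0 hxs]
  obtain ⟨m, hm⟩ : ∃ m, PySem.List.max? tteoks (fun y => y) = some m := by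
    rcases hopt : PySem.List.max? tteoks (fun y => y) with _ | m
    · exact absurd ((PySem.List.max?_eq_none_iff tteoks (fun y => y)).mp hopt) hne
    · exact ⟨m, rfl⟩
  rw [hm]
  simp only [Option.getD_some]
  have hperm := PySem.List.sorted_perm tteoks (fun y => y) false
  have hpos : 0 < (PySem.List.sorted tteoks (fun y => y) false).length :=
    List.length_pos_iff.mpr hxs
  have hlast_mem : (PySem.List.sorted tteoks (fun y => y) false).getLast hxs ∈ tteoks :=
    hperm.mem_iff.mp (List.getLast_mem hxs)
  have h1 : (PySem.List.sorted tteoks (fun y => y) false).getLast hxs ≤ m :=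
    PySem.List.max?_isMax hm _ hlast_mem
  have hm_mem : m ∈ PySem.List.sorted tteoks (fun y => y) false :=
    hperm.mem_iff.mpr (PySem.List.max?_mem hm)
  obtain ⟨i, hi, hieq⟩ := List.mem_iff_getElem.mp hm_mem
  have h2 : m ≤ (PySem.List.sorted tteoks (fun y => y) false).getLast hxs := by
    rw [List.getLast_eq_getElem, ← hieq]
    exact PySem.List.sorted_id_getElem_mono tteoks (by omega) (by omega)
  exact le_antisymm h1 h2 ▸ rfl

-- ===== VERDICT (by name: the statement is the Claim_ definition above) =====
theorem make_tteokbokki_tteok_spec : Claim_equal_make_tteokbokki_tteok := by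
  intro tteoks length _ hpre
  unfold Spec_make_tteokbokki_tteok make_tteokbokki_tteok make_tteokbokki_tteok_alt
  rw [max_eq_last tteoks hpre]
  exact loops_eq tteoks _ _ _ (fun h => cut_eq tteoks h) length 0 _ _
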